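-- pv_equiv track=rewrite | github.com/anirudlappathi/Poshify | algorithm/color_algo.py | ContrastMatch
-- ===== SOURCE A (Python) =====
-- def ContrastMatch(outfit):
--     top = outfit[0]
--     bot = outfit[1]
--     shoes = outfit[2]
--
--     warm_count = len([color for color in outfit if color[1] == 'WARM'])
--     if warm_count < 1: return False
--
--     dark_count = len([color for color in outfit if color[0] == 'DARK'])
--     bright_count = len([color for color in outfit if color[0] == 'BRIGHT'])
--     if dark_count < 1 or bright_count < 1:
--         return False
--
--     return True
-- ===== SOURCE B (Python) =====
-- def ContrastMatch(outfit):
--     has_warm = has_dark = has_bright = False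
--     for color in outfit:
--         if color[1] == 'WARM':
--             has_warm = True
--         if color[0] == 'DARK':
--             has_dark = True
--         if color[0] == 'BRIGHT':
--             has_bright = True
--     return has_warm and has_dark and has_bright
-- ===== Notes on version B (the rewrite author's own statement) =====
-- stated objective: simpler
-- what changed: Three separate list-comprehension scans (plus unused top/bot/shoes indexing) are replaced by one pass maintaining three boolean flags; the early-return count checks disappear.
import Mathlib
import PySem

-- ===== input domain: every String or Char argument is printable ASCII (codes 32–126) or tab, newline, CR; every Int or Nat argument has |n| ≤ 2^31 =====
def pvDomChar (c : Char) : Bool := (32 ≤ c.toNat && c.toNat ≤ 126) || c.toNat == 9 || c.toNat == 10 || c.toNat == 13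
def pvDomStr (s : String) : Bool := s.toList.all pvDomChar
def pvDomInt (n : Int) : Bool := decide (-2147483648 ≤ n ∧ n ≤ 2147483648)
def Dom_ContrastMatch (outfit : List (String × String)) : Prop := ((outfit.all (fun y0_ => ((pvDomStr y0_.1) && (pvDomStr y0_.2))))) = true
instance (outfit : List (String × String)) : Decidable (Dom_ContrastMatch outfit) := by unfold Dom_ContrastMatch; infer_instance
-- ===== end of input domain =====

-- B replaces A's three list-comprehension scans with one single-pass loop over three boolean flags (simpler; same O(n) cost).

-- ===== PORT A =====
-- outfit[0]/outfit[1]/outfit[2] raise IndexError when the list is shorter than 3; pyGet? = none there (excluded by Pre_).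
def ContrastMatch (outfit : List (String × String)) : Bool :=
  match PySem.List.pyGet? outfit 0, PySem.List.pyGet? outfit 1, PySem.List.pyGet? outfit 2 with
  | some _top, some _bot, some _shoes =>
    let warm_count := (outfit.filter (fun color => color.2 == "WARM")).length
    if warm_count < 1 then false
    else
      let dark_count := (outfit.filter (fun color => color.1 == "DARK")).length
      let bright_count := (outfit.filter (fun color => color.1 == "BRIGHT")).length
      if dark_count < 1 || bright_count < 1 then false
      else true
  | _, _, _ => false  -- unreachable under Pre_ (IndexError in Python)

-- ===== PORT B =====
def ContrastMatch_alt (outfit : List (String × String)) : Bool :=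
  let flags := outfit.foldl
    (fun (st : Bool × Bool × Bool) color =>
      (st.1 || color.2 == "WARM", st.2.1 || color.1 == "DARK", st.2.2 || color.1 == "BRIGHT"))
    (false, false, false)
  flags.1 && flags.2.1 && flags.2.2

-- ===== PRECONDITION & SPEC =====
-- Pre_: A indexes outfit[0], outfit[1], outfit[2] and so raises IndexError on lists shorter than 3.
def Pre_ContrastMatch (outfit : List (String × String)) : Prop := 3 ≤ outfit.length
instance (outfit : List (String × String)) : Decidable (Pre_ContrastMatch outfit) := by unfold Pre_ContrastMatch; infer_instance
def pvWitness_ContrastMatch : (List (String × String)) :=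
  [("DARK", "WARM"), ("BRIGHT", "COOL"), ("LIGHT", "COOL")]

def Spec_ContrastMatch (outfit : List (String × String)) (out : Bool) : Prop := out = ContrastMatch_alt outfit
instance (outfit : List (String × String)) (out : Bool) : Decidable (Spec_ContrastMatch outfit out) := by unfold Spec_ContrastMatch; infer_instance

-- ===== CLAIM (what is proved, stated in full; the proofs are below) =====
def Claim_equal_ContrastMatch : Prop := ∀ (outfit : List (String × String)), Dom_ContrastMatch outfit → Pre_ContrastMatch outfit → Spec_ContrastMatch outfit (ContrastMatch outfit)

-- ===== LEMMAS AND PROOFS =====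

-- B's fold accumulates the three flags as disjunctions, i.e. List.any.
theorem flags_foldl (outfit : List (String × String)) (a b c : Bool) :
    outfit.foldl
      (fun (st : Bool × Bool × Bool) color =>
        (st.1 || color.2 == "WARM", st.2.1 || color.1 == "DARK", st.2.2 || color.1 == "BRIGHT"))
      (a, b, c)
    = (a || outfit.any (fun color => color.2 == "WARM"),
       b || outfit.any (fun color => color.1 == "DARK"),
       c || outfit.any (fun color => color.1 == "BRIGHT")) := by
  induction outfit generalizing a b c with
  | nil => simp
  | cons hd tl ih =>
    simp [List.foldl_cons, ih, Bool.or_assoc]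

theorem alt_eq_any (outfit : List (String × String)) :
    ContrastMatch_alt outfit
    = (outfit.any (fun color => color.2 == "WARM")
       && outfit.any (fun color => color.1 == "DARK")
       && outfit.any (fun color => color.1 == "BRIGHT")) := by
  simp [ContrastMatch_alt, flags_foldl]

theorem filter_lt_iff {α : Type} (l : List α) (p : α → Bool) :
    ((l.filter p).length < 1) ↔ (l.any p = false) := by
  simp [List.length_eq_zero_iff, List.filter_eq_nil_iff]

-- A on a list of length ≥ 3: each count check is exactly an existence (any) check.
theorem A_cons (x y z : String × String) (rest : List (String × String)) :
    ContrastMatch (x :: y :: z :: rest)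
    = ((x :: y :: z :: rest).any (fun color => color.2 == "WARM")
       && (x :: y :: z :: rest).any (fun color => color.1 == "DARK")
       && (x :: y :: z :: rest).any (fun color => color.1 == "BRIGHT")) := by
  have g0 : PySem.List.pyGet? (x :: y :: z :: rest) 0 = some x := by simp [pysem]
  have g1 : PySem.List.pyGet? (x :: y :: z :: rest) 1 = some y := by simp [pysem]
  have g2 : PySem.List.pyGet? (x :: y :: z :: rest) 2 = some z := by simp [pysem]
  simp only [ContrastMatch, g0, g1, g2]
  set l := x :: y :: z :: rest with hl
  split_ifs with h1 h2
  · rw [filter_lt_iff] at h1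
    simp [h1]
  · simp only [Bool.or_eq_true, decide_eq_true_eq] at h2
    rcases h2 with h2 | h2 <;> rw [filter_lt_iff] at h2 <;> simp [h2]
  · rw [Nat.not_lt, Nat.one_le_iff_ne_zero] at h1
    simp only [Bool.or_eq_true, decide_eq_true_eq, not_or, Nat.not_lt, Nat.one_le_iff_ne_zero] at h2
    obtain ⟨hd, hb⟩ := h2
    have hw : l.any (fun color => color.2 == "WARM") = true := by
      rcases hc : l.any (fun color => color.2 == "WARM") with _ | _
      · rw [← filter_lt_iff] at hc; omega
      · rfl
    have hdd : l.any (fun color => color.1 == "DARK") = true := by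
      rcases hc : l.any (fun color => color.1 == "DARK") with _ | _
      · rw [← filter_lt_iff] at hc; omega
      · rfl
    have hbb : l.any (fun color => color.1 == "BRIGHT") = true := by
      rcases hc : l.any (fun color => color.1 == "BRIGHT") with _ | _
      · rw [← filter_lt_iff] at hc; omega
      · rfl
    simp [hw, hdd, hbb]

-- ===== VERDICT (by name: the statement is the Claim_ definition above) =====
theorem ContrastMatch_spec : Claim_equal_ContrastMatch := by
  intro outfit _hdom hpre
  unfold Pre_ContrastMatch at hpre
  unfold Spec_ContrastMatch
  rcases outfit with _ | ⟨x, _ | ⟨y, _ | ⟨z, rest⟩⟩⟩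
  · simp at hpre
  · simp at hpre
  · simp at hpre
  · rw [alt_eq_any, A_cons]
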